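-- pv_equiv track=rewrite | github.com/bestak98/juntak | test.py | calculate_total_flowtime
-- ===== SOURCE A (Python) =====
-- def calculate_total_flowtime(ready_time, processing_time, schedule):
--
--     flowtime = 0
--     completion_time_list = []
--
--     for i in range(len(schedule)):
--         job_index = schedule[i] - 1
--         if i == 0 :
--             completion_time = ready_time[job_index] + processing_time[job_index]
--             completion_time_list.append(completion_time)
--         else:
--             if completion_time_list[i - 1] < ready_time[job_index]:
--                 completion_time = ready_time[job_index] + processing_time[job_index]
--             else:
--                 completion_time = completion_time_list[i - 1] + processing_time[job_index]
--             completion_time_list.append(completion_time)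
--
--     flowtime = sum(completion_time_list)
--     return flowtime
-- ===== SOURCE B (Python) =====
-- def calculate_total_flowtime(ready_time, processing_time, schedule):
--     # Closed form: completion of the i-th scheduled job is Q[i] + max_{j<=i}(r_j - Q[j-1]),
--     # where Q[i] is the total processing time of the first i+1 scheduled jobs and r_j the
--     # ready time of the j-th scheduled job.
--     # stage 1: processing prefix sums and release slacks
--     q = 0
--     qs = []      # qs[i] = total processing of first i+1 scheduled jobs
--     shifts = []  # shifts[i] = ready time of i-th scheduled job minus processing before it
--     for job in schedule:
--         shifts.append(ready_time[job - 1] - q)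
--         q += processing_time[job - 1]
--         qs.append(q)
--     # stage 2: running maximum of slacks; completion = qs[i] + m; sum them
--     total = 0
--     m = None
--     for qi, si in zip(qs, shifts):
--         m = si if m is None else max(m, si)
--         total += qi + m
--     return total
-- ===== Notes on version B (the rewrite author's own statement) =====
-- stated objective: alternative
-- what changed: B computes flowtime via the closed form C_i = Q_i + max_{j<=i}(r_j - Q_{j-1}) (Q = prefix sums of processing times in schedule order): one staged pass builds the prefix sums and release slacks, a second pass takes a running maximum of the slacks and sums Q_i plus that maximum, replacing A's completion-time recurrence list entirely.
import Mathlib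
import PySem

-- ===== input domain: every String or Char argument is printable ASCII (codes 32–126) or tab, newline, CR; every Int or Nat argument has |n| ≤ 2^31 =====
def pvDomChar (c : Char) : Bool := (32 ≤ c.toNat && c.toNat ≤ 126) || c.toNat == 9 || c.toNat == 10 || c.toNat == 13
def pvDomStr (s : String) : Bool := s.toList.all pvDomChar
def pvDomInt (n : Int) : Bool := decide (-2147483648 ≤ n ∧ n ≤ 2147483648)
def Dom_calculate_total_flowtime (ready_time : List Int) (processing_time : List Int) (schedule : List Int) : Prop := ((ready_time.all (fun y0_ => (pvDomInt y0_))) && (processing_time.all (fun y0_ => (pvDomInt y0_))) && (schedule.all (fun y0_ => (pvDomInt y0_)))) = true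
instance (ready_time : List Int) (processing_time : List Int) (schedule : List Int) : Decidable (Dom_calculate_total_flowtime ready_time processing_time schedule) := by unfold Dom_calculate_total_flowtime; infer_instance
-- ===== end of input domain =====

-- B replaces A's completion-time recurrence (build list, then sum) by the closed form
-- C_i = Q_i + max_{j≤i}(r_j - Q_{j-1}) over processing prefix sums Q, in staged passes
-- (objective: alternative).

-- ===== PORT A =====
-- loop body of A's `for i in range(len(schedule))` (pyGetD is exact under Pre_, which
-- keeps every index in range; the list index i-1 is always in range since the list has i elements)
def pvAstep (ready_time processing_time schedule : List Int) (ctl : List Int) (i : Int) : List Int :=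
  let job_index := PySem.List.pyGetD schedule i 0 - 1
  if i = 0 then
    ctl ++ [PySem.List.pyGetD ready_time job_index 0 + PySem.List.pyGetD processing_time job_index 0]
  else
    let completion_time :=
      if PySem.List.pyGetD ctl (i - 1) 0 < PySem.List.pyGetD ready_time job_index 0 then
        PySem.List.pyGetD ready_time job_index 0 + PySem.List.pyGetD processing_time job_index 0
      else
        PySem.List.pyGetD ctl (i - 1) 0 + PySem.List.pyGetD processing_time job_index 0
    ctl ++ [completion_time]

def calculate_total_flowtime (ready_time : List Int) (processing_time : List Int) (schedule : List Int) : Int :=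
  let completion_time_list :=
    (PySem.List.pyRange 0 (schedule.length : Int) 1).foldl (pvAstep ready_time processing_time schedule) []
  completion_time_list.sum

-- ===== PORT B =====
-- stage 1 loop body of B: state = (q, qs, shifts)
def pvBstage1 (ready_time processing_time : List Int) (st : Int × List Int × List Int) (job : Int) : Int × List Int × List Int :=
  let shifts' := st.2.2 ++ [PySem.List.pyGetD ready_time (job - 1) 0 - st.1]
  let q' := st.1 + PySem.List.pyGetD processing_time (job - 1) 0
  (q', st.2.1 ++ [q'], shifts')

-- stage 2 loop body of B: state = (total, m); m = None ↦ none
def pvBstage2 (st : Int × Option Int) (p : Int × Int) : Int × Option Int :=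
  let m := match st.2 with | none => p.2 | some mm => max mm p.2
  (st.1 + p.1 + m, some m)

def calculate_total_flowtime_alt (ready_time : List Int) (processing_time : List Int) (schedule : List Int) : Int :=
  let st := schedule.foldl (pvBstage1 ready_time processing_time) (0, [], [])
  ((st.2.1.zip st.2.2).foldl pvBstage2 (0, none)).1

-- ===== PRECONDITION & SPEC =====
-- Pre_ excludes exactly the inputs where Python A raises IndexError: a job whose
-- index job-1 is out of range for ready_time or processing_time.
def Pre_calculate_total_flowtime (ready_time : List Int) (processing_time : List Int) (schedule : List Int) : Prop :=
  ∀ job ∈ schedule, PySem.Raise.InRange ready_time.length (job - 1) ∧ PySem.Raise.InRange processing_time.length (job - 1)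
instance (ready_time : List Int) (processing_time : List Int) (schedule : List Int) : Decidable (Pre_calculate_total_flowtime ready_time processing_time schedule) := by unfold Pre_calculate_total_flowtime; infer_instance

def pvWitness_calculate_total_flowtime : List Int × List Int × List Int := ([1, 2, 3], [2, 2, 2], [3, 1, 2])

def Spec_calculate_total_flowtime (ready_time : List Int) (processing_time : List Int) (schedule : List Int) (out : Int) : Prop := out = calculate_total_flowtime_alt ready_time processing_time schedule
instance (ready_time : List Int) (processing_time : List Int) (schedule : List Int) (out : Int) : Decidable (Spec_calculate_total_flowtime ready_time processing_time schedule out) := by unfold Spec_calculate_total_flowtime; infer_instance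

-- ===== CLAIM (what is proved, stated in full; the proofs are below) =====
def Claim_equal_calculate_total_flowtime : Prop := ∀ (ready_time : List Int) (processing_time : List Int) (schedule : List Int), Dom_calculate_total_flowtime ready_time processing_time schedule → Pre_calculate_total_flowtime ready_time processing_time schedule → Spec_calculate_total_flowtime ready_time processing_time schedule (calculate_total_flowtime ready_time processing_time schedule)

-- ===== LEMMAS AND PROOFS =====

-- intermediate recurrence (proof device, used by no port): the completion-time
-- recurrence as a single accumulator pass; A reduces to it, and B's closed form equals it.
def pvMidStep (ready_time processing_time : List Int) (st : Int × Option Int) (job : Int) : Int × Option Int :=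
  let idx := job - 1
  let ready := PySem.List.pyGetD ready_time idx 0
  let comp := (match st.2 with | none => ready | some p => max p ready) + PySem.List.pyGetD processing_time idx 0
  (st.1 + comp, some comp)

-- A's fold from position k with accumulated list ctl (|ctl| = k) computes, after summing,
-- the same value as the recurrence fold over the remaining jobs with state (ctl.sum, ctl.getLast?).
lemma pv_loop_eq (ready_time processing_time schedule : List Int) :
    ∀ (m k : Nat) (ctl : List Int), k + m = schedule.length → ctl.length = k →
      ((PySem.List.pyRange (k : Int) (schedule.length : Int) 1).foldl
        (pvAstep ready_time processing_time schedule) ctl).sum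
      = ((schedule.drop k).foldl (pvMidStep ready_time processing_time) (ctl.sum, ctl.getLast?)).1 := by
  intro m
  induction m with
  | zero =>
    intro k ctl hk hlen
    have hk' : k = schedule.length := by omega
    subst hk'
    rw [PySem.List.pyRange_one_eq_nil (le_refl _), List.drop_length]
    simp
  | succ m ih =>
    intro k ctl hk hlen
    have hklt : k < schedule.length := by omega
    have hcons : PySem.List.pyRange (k : Int) (schedule.length : Int) 1
        = (k : Int) :: PySem.List.pyRange ((k : Int) + 1) (schedule.length : Int) 1 :=
      PySem.List.pyRange_one_cons (by exact_mod_cast hklt)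
    have hcast : ((k : Int) + 1) = ((k + 1 : Nat) : Int) := by push_cast; ring
    have hdrop : schedule.drop k = schedule[k] :: schedule.drop (k + 1) :=
      List.drop_eq_getElem_cons hklt
    have hgets : PySem.List.pyGetD schedule (k : Int) 0 = schedule[k] := by
      rw [PySem.List.pyGetD_natCast]; exact List.getD_eq_getElem _ _ hklt
    rw [hcons, List.foldl_cons, hcast, hdrop, List.foldl_cons]
    cases k with
    | zero =>
      have hctl : ctl = [] := List.eq_nil_of_length_eq_zero hlen
      subst hctl
      have hgets0 : PySem.List.pyGetD schedule (0 : Int) 0 = schedule[0] := by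
        simpa using hgets
      have hA : pvAstep ready_time processing_time schedule [] ((0 : Nat) : Int)
          = [PySem.List.pyGetD ready_time (schedule[0] - 1) 0
              + PySem.List.pyGetD processing_time (schedule[0] - 1) 0] := by
        simp [pvAstep, hgets0]
      rw [hA, ih 1 _ (by omega) (by simp)]
      simp [pvMidStep]
    | succ j =>
      have hj : j < ctl.length := by omega
      have hprev : PySem.List.pyGetD ctl (((j + 1 : Nat) : Int) - 1) 0 = ctl[j] := by
        have hc : (((j + 1 : Nat) : Int) - 1) = ((j : Nat) : Int) := by push_cast; ring
        rw [hc, PySem.List.pyGetD_natCast]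
        exact List.getD_eq_getElem _ _ hj
      have hlast : ctl.getLast? = some ctl[j] := by
        rw [List.getLast?_eq_getElem?]
        simp [hlen]
      set r := PySem.List.pyGetD ready_time (schedule[j + 1] - 1) 0 with hr
      set p := PySem.List.pyGetD processing_time (schedule[j + 1] - 1) 0 with hp
      set last := ctl[j] with hlastd
      have hA : pvAstep ready_time processing_time schedule ctl ((j + 1 : Nat) : Int)
          = ctl ++ [max last r + p] := by
        simp only [pvAstep, hgets, hprev]
        rw [if_neg (by push_cast; omega)]
        congr 1
        by_cases h : last < r
        · rw [if_pos h, max_eq_right (le_of_lt h)]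
        · rw [if_neg h, max_eq_left (by omega)]
      rw [hA, ih (j + 2) _ (by omega) (by simp [hlen])]
      simp only [pvMidStep, hlast]
      rw [← hr, ← hp]
      norm_num

-- the (Q_i, r_i - Q_{i-1}) pairs B's stage 1 produces, as a structural recursion
def pvPairs (ready_time processing_time : List Int) (a : Int) : List Int → List (Int × Int)
  | [] => []
  | job :: s =>
      (a + PySem.List.pyGetD processing_time (job - 1) 0,
       PySem.List.pyGetD ready_time (job - 1) 0 - a)
      :: pvPairs ready_time processing_time (a + PySem.List.pyGetD processing_time (job - 1) 0) s

-- stage 1 characterization: the zip of the two built lists is pvPairs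
lemma pv_stage1_eq (ready_time processing_time : List Int) :
    ∀ (s : List Int) (a : Int) (qs shifts : List Int), qs.length = shifts.length →
      ((s.foldl (pvBstage1 ready_time processing_time) (a, qs, shifts)).2.1).zip
        ((s.foldl (pvBstage1 ready_time processing_time) (a, qs, shifts)).2.2)
      = qs.zip shifts ++ pvPairs ready_time processing_time a s := by
  intro s
  induction s with
  | nil => intro a qs shifts h; simp [pvPairs]
  | cons job s ih =>
    intro a qs shifts h
    rw [List.foldl_cons]
    have hstep : pvBstage1 ready_time processing_time (a, qs, shifts) job
        = (a + PySem.List.pyGetD processing_time (job - 1) 0,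
           qs ++ [a + PySem.List.pyGetD processing_time (job - 1) 0],
           shifts ++ [PySem.List.pyGetD ready_time (job - 1) 0 - a]) := rfl
    rw [hstep, ih _ _ _ (by simp [h]), List.zip_append h]
    simp [pvPairs]

-- stage 2 over pvPairs equals the recurrence fold, given the coupling invariant
-- prev-completion = a + m
lemma pv_stage2_some (ready_time processing_time : List Int) :
    ∀ (s : List Int) (a t mm : Int),
      ((pvPairs ready_time processing_time a s).foldl pvBstage2 (t, some mm)).1
      = (s.foldl (pvMidStep ready_time processing_time) (t, some (a + mm))).1 := by
  intro s
  induction s with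
  | nil => intro a t mm; simp [pvPairs]
  | cons job s ih =>
    intro a t mm
    simp only [pvPairs, List.foldl_cons, pvBstage2, pvMidStep]
    set r := PySem.List.pyGetD ready_time (job - 1) 0
    set p := PySem.List.pyGetD processing_time (job - 1) 0
    rw [ih]
    have h1 : a + p + max mm (r - a) = max (a + mm) r + p := by
      rcases le_total mm (r - a) with hle | hle
      · rw [max_eq_right hle, max_eq_right (by omega)]; ring
      · rw [max_eq_left hle, max_eq_left (by omega)]; ring
    have h2 : t + (a + p) + max mm (r - a) = t + (max (a + mm) r + p) := by omega
    rw [h2, h1]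

lemma pv_stage2_none (ready_time processing_time : List Int) (s : List Int) (a t : Int) :
    ((pvPairs ready_time processing_time a s).foldl pvBstage2 (t, none)).1
    = (s.foldl (pvMidStep ready_time processing_time) (t, none)).1 := by
  cases s with
  | nil => simp [pvPairs]
  | cons job s =>
    simp only [pvPairs, List.foldl_cons, pvBstage2, pvMidStep]
    rw [pv_stage2_some]
    have h : a + PySem.List.pyGetD processing_time (job - 1) 0
        + (PySem.List.pyGetD ready_time (job - 1) 0 - a)
        = PySem.List.pyGetD ready_time (job - 1) 0
          + PySem.List.pyGetD processing_time (job - 1) 0 := by ring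
    have h2 : t + (a + PySem.List.pyGetD processing_time (job - 1) 0)
        + (PySem.List.pyGetD ready_time (job - 1) 0 - a)
        = t + (PySem.List.pyGetD ready_time (job - 1) 0
              + PySem.List.pyGetD processing_time (job - 1) 0) := by ring
    rw [h, h2]

-- ===== VERDICT (by name: the statement is the Claim_ definition above) =====
theorem calculate_total_flowtime_spec : Claim_equal_calculate_total_flowtime := by
  intro ready_time processing_time schedule _ _
  unfold Spec_calculate_total_flowtime calculate_total_flowtime calculate_total_flowtime_alt
  have hA := pv_loop_eq ready_time processing_time schedule schedule.length 0 [] (by omega) rfl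
  have hS := pv_stage1_eq ready_time processing_time schedule 0 [] [] rfl
  simp only [List.zip_nil_left, List.nil_append] at hS
  have hB := pv_stage2_none ready_time processing_time schedule 0 0
  simp only [List.drop_zero, List.sum_nil, List.getLast?_nil] at hA
  show (List.foldl (pvAstep ready_time processing_time schedule) []
        (PySem.List.pyRange 0 (schedule.length : Int) 1)).sum
    = (((((schedule.foldl (pvBstage1 ready_time processing_time) (0, [], [])).2.1).zip
        ((schedule.foldl (pvBstage1 ready_time processing_time) (0, [], [])).2.2)).foldl
          pvBstage2 (0, none)).1)
  rw [hS, hB]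
  simpa using hA
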